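-- pv_equiv track=rewrite | github.com/MINT-SJTU/Evo-SOTA.io | data/DataProcess.py | split_by_category
-- ===== SOURCE A (Python) =====
-- from typing import Optional, Dict, Any, List
--
-- def split_by_category(data_list: List[Dict]) -> Dict[str, List[Dict]]:
--     """
--     将数据按开源和标准测试情况分类
--     返回三个列表：
--     - standard_opensource: 标准测试 + 开源
--     - standard_closed: 标准测试 + 未开源
--     - non_standard: 非标准测试（附录）
--     """
--     standard_opensource = []
--     standard_closed = []
--     non_standard = []
--
--     for item in data_list:
--         if not item.get('is_standard', False):
--             non_standard.append(item)
--         elif item.get('is_opensource', False):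
--             standard_opensource.append(item)
--         else:
--             standard_closed.append(item)
--
--     return {
--         'standard_opensource': standard_opensource,
--         'standard_closed': standard_closed,
--         'non_standard': non_standard
--     }
-- ===== SOURCE B (Python) =====
-- def split_by_category(data_list):
--     """
--     将数据按开源和标准测试情况分类 — three independent filtering passes,
--     one list comprehension per category, instead of one bucketing loop.
--     """
--     def is_std(item):
--         return item.get('is_standard', False)
--
--     def is_os(item):
--         return item.get('is_opensource', False)
--
--     return {
--         'standard_opensource': [it for it in data_list if is_std(it) and is_os(it)],
--         'standard_closed': [it for it in data_list if is_std(it) and not is_os(it)],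
--         'non_standard': [it for it in data_list if not is_std(it)],
--     }
-- ===== Notes on version B (the rewrite author's own statement) =====
-- stated objective: alternative
-- what changed: Replaced the single elif-chain bucketing loop with three independent list-comprehension filter passes, one per category, using explicit predicates on is_standard/is_opensource.
import Mathlib
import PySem

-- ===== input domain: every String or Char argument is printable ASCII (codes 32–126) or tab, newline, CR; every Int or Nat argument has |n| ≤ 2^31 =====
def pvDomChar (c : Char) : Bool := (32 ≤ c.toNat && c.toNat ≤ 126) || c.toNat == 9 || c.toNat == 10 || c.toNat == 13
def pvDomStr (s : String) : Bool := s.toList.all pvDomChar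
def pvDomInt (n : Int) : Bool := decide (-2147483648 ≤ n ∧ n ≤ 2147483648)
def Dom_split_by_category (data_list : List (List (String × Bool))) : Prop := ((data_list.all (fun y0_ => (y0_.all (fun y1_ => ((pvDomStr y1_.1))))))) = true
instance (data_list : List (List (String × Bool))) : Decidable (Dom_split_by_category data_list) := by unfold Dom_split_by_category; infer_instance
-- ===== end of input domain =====

-- B replaces A's single elif-chain bucketing loop with three independent filter passes (alternative decomposition, same cost class).


-- item.get(k, False): first-match lookup in the association list, default False (shared dict primitive)
def pyGetBool (item : List (String × Bool)) (k : String) : Bool :=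
  ((item.find? (fun p => p.1 == k)).map (·.2)).getD false

-- ===== PORT A =====
-- A's loop body: the elif chain appending item to one of the three buckets
def splitStep (acc : List (List (String × Bool)) × List (List (String × Bool)) × List (List (String × Bool)))
    (item : List (String × Bool)) :
    List (List (String × Bool)) × List (List (String × Bool)) × List (List (String × Bool)) :=
  if ¬ pyGetBool item "is_standard" then (acc.1, acc.2.1, acc.2.2 ++ [item])
  else if pyGetBool item "is_opensource" then (acc.1 ++ [item], acc.2.1, acc.2.2)
  else (acc.1, acc.2.1 ++ [item], acc.2.2)

-- one fold over data_list, threading the three accumulator lists, branches in A's order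
def split_by_category (data_list : List (List (String × Bool))) : List (String × List (List (String × Bool))) :=
  let r := data_list.foldl splitStep ([], [], [])
  [("standard_opensource", r.1), ("standard_closed", r.2.1), ("non_standard", r.2.2)]

-- ===== PORT B =====
-- three independent filter passes, one per category
def split_by_category_alt (data_list : List (List (String × Bool))) : List (String × List (List (String × Bool))) :=
  [("standard_opensource", data_list.filter (fun it => pyGetBool it "is_standard" && pyGetBool it "is_opensource")),
   ("standard_closed", data_list.filter (fun it => pyGetBool it "is_standard" && !pyGetBool it "is_opensource")),
   ("non_standard", data_list.filter (fun it => !pyGetBool it "is_standard"))]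

-- ===== PRECONDITION & SPEC =====
def Spec_split_by_category (data_list : List (List (String × Bool))) (out : List (String × List (List (String × Bool)))) : Prop := out = split_by_category_alt data_list
instance (data_list : List (List (String × Bool))) (out : List (String × List (List (String × Bool)))) : Decidable (Spec_split_by_category data_list out) := by unfold Spec_split_by_category; infer_instance

-- ===== CLAIM (what is proved, stated in full; the proofs are below) =====
def Claim_equal_split_by_category : Prop := ∀ (data_list : List (List (String × Bool))), Dom_split_by_category data_list → Spec_split_by_category data_list (split_by_category data_list)

-- ===== LEMMAS AND PROOFS =====

-- A's fold, started at arbitrary accumulators, appends exactly the three filters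
theorem split_fold_eq_filters (l : List (List (String × Bool)))
    (a b c : List (List (String × Bool))) :
    l.foldl splitStep (a, b, c)
    = (a ++ l.filter (fun it => pyGetBool it "is_standard" && pyGetBool it "is_opensource"),
       b ++ l.filter (fun it => pyGetBool it "is_standard" && !pyGetBool it "is_opensource"),
       c ++ l.filter (fun it => !pyGetBool it "is_standard")) := by
  induction l generalizing a b c with
  | nil => simp
  | cons x xs ih =>
    rw [List.foldl_cons]
    by_cases hs : pyGetBool x "is_standard"
    · by_cases ho : pyGetBool x "is_opensource"
      · rw [show splitStep (a, b, c) x = (a ++ [x], b, c) from by simp [splitStep, hs, ho], ih]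
        simp [hs, ho]
      · rw [show splitStep (a, b, c) x = (a, b ++ [x], c) from by simp [splitStep, hs, ho], ih]
        simp [hs, ho]
    · rw [show splitStep (a, b, c) x = (a, b, c ++ [x]) from by simp [splitStep, hs], ih]
      simp [hs]

-- ===== VERDICT (by name: the statement is the Claim_ definition above) =====
theorem split_by_category_spec : Claim_equal_split_by_category := by
  intro data_list _
  unfold Spec_split_by_category split_by_category split_by_category_alt
  rw [split_fold_eq_filters]
  simp
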